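-- pv_equiv track=rewrite | github.com/golam-m-hossain/anubadok | anubadok/en_pp.py | process_for_make_verb_adjustment
-- ===== SOURCE A (Python) =====
-- def process_for_make_verb_adjustment(sentence_input: list) -> list:
--     """
--     Check for 'make sure' pattern and concatenate them
--     """
--     sentence_output = []
--     word_position = 0
--     last_make_position = 0
--     word_make_ind = False
--
--     for sts in sentence_input:
--         wds_array = sts.split('\t')
--         wds_array.extend([''] * (3 - len(wds_array)))  # Ensure at least 3 elements
--
--         if wds_array[0].lower() == 'make' and wds_array[1] == "VV":
--             last_make_position = word_position
--             sentence_output.append(sts)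
--             word_make_ind = True
--         elif word_make_ind and wds_array[0].lower() == 'sure':
--             word_make_ind = False  # reset
--
--             if word_position == last_make_position + 1:
--                 ppst = sentence_output[last_make_position]
--                 wds_tmp_array = ppst.split('\t')
--
--                 ppst = (
--                     f"{wds_tmp_array[0]}.{wds_array[0]}\t"
--                     f"{wds_tmp_array[1]}\t"
--                     f"{wds_tmp_array[0].lower()}.{wds_array[0].lower()}"
--                 )
--
--                 # Replace "make" with "make.sure"
--                 sentence_output[last_make_position] = ppst
--                 word_position -= 1  # adjust position counter
--             else:
--                 sentence_output.append(sts)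
--         else:
--             sentence_output.append(sts)
--
--         word_position += 1
--
--     return sentence_output
-- ===== SOURCE B (Python) =====
-- def process_for_make_verb_adjustment(sentence_input: list) -> list:
--     """
--     Check for 'make sure' pattern and concatenate them.
--     Single pairwise scan: merge a 'make'/VV token with an immediately
--     following 'sure' token, consuming both; no position/flag state.
--     """
--     out = []
--     i = 0
--     n = len(sentence_input)
--     while i < n:
--         f = sentence_input[i].split('\t')
--         if (f[0].lower() == 'make' and len(f) > 1 and f[1] == 'VV'
--                 and i + 1 < n
--                 and sentence_input[i + 1].split('\t')[0].lower() == 'sure'):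
--             s = sentence_input[i + 1].split('\t')[0]
--             out.append(f"{f[0]}.{s}\t{f[1]}\t{f[0].lower()}.{s.lower()}")
--             i += 2
--         else:
--             out.append(sentence_input[i])
--             i += 1
--     return out
-- ===== Notes on version B (the rewrite author's own statement) =====
-- stated objective: simpler
-- what changed: Replaces A's stateful single fold (position counter, last-make position, pending flag, and in-place rewrite of the already-emitted output element) with a stateless pairwise scan that merges a 'make'/VV token with an immediately following 'sure' token in one step, never revisiting the output.
import Mathlib
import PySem

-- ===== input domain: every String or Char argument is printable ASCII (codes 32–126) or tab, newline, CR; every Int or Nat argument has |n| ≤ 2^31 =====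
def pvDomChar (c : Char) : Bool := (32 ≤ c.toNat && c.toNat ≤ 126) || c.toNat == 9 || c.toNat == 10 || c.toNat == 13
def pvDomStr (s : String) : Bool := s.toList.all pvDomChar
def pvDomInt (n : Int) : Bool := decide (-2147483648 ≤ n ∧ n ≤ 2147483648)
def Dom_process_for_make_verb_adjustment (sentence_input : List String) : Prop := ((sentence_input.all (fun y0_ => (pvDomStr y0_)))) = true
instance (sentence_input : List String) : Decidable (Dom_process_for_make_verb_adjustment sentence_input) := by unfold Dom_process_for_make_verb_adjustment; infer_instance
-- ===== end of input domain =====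

-- ===== PORT A =====
-- Both Pythons split on tabs and build the same merged f-string, so those two
-- primitives are shared helpers; the algorithms (A: stateful fold with in-place
-- rewrite of the output, B: stateless pairwise merge) are ported separately below.
-- s.split('\t'): sep = "\t" ≠ "", so PySem.Str.split? is always `some` and getD [] is exact.
def pvSplitTab (s : String) : List String := (PySem.Str.split? s "\t").getD []

-- the f-string  f"{f[0]}.{sure}\t{f[1]}\t{f[0].lower()}.{sure.lower()}"  with f = mk.split('\t')
def pvCombine (mk sure : String) : String :=
  let f := pvSplitTab mk
  PySem.List.pyGetD f 0 "" ++ "." ++ sure ++ "\t" ++ PySem.List.pyGetD f 1 "" ++ "\t"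
    ++ PySem.Str.lower (PySem.List.pyGetD f 0 "") ++ "." ++ PySem.Str.lower sure

-- A's test  wds_array[0].lower() == 'make' and wds_array[1] == 'VV'  on the padded field list
def pvMakeA (s : String) : Bool :=
  let w0 := pvSplitTab s
  let w := w0 ++ List.replicate (3 - w0.length) ""
  PySem.Str.lower (PySem.List.pyGetD w 0 "") == "make" && (PySem.List.pyGetD w 1 "" == "VV")

-- A's test  wds_array[0].lower() == 'sure'  on the padded field list
def pvSureA (s : String) : Bool :=
  let w0 := pvSplitTab s
  let w := w0 ++ List.replicate (3 - w0.length) ""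
  PySem.Str.lower (PySem.List.pyGetD w 0 "") == "sure"

-- one iteration of A's for-loop; state = (sentence_output, (word_position, (last_make_position, word_make_ind)))
def pvAStep (st : List String × (Int × (Int × Bool))) (sts : String) : List String × (Int × (Int × Bool)) :=
  let out := st.1
  let wp := st.2.1
  let lmp := st.2.2.1
  let ind := st.2.2.2
  let w0 := pvSplitTab sts
  let w := w0 ++ List.replicate (3 - w0.length) ""
  let st' :=
    if pvMakeA sts then
      (out ++ [sts], (wp, (wp, true)))
    else if ind && pvSureA sts then
      (if wp == lmp + 1 then
        -- sentence_output[last_make_position] read and in-place assignment: the index is always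
        -- nonnegative and in range here (invariant: word_position = len(sentence_output) and
        -- last_make_position + 1 = word_position), so pyGetD / List.set are exact.
        (out.set lmp.toNat (pvCombine (PySem.List.pyGetD out lmp "") (PySem.List.pyGetD w 0 "")),
          (wp - 1, (lmp, false)))
      else
        (out ++ [sts], (wp, (lmp, false))))
    else
      (out ++ [sts], (wp, (lmp, ind)))
  (st'.1, (st'.2.1 + 1, st'.2.2))

def process_for_make_verb_adjustment (sentence_input : List String) : List String :=
  (sentence_input.foldl pvAStep ([], (0, (0, false)))).1

-- ===== PORT B =====
-- merge condition of Source B on the unpadded split: cur's word lowercases to 'make' with tag 'VV',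
-- and nxt's first field lowercases to 'sure'
def pvMergeCond (cur nxt : String) : Bool :=
  let f := pvSplitTab cur
  PySem.Str.lower (PySem.List.pyGetD f 0 "") == "make" && decide (1 < f.length)
    && (PySem.List.pyGetD f 1 "" == "VV")
    && (PySem.Str.lower (PySem.List.pyGetD (pvSplitTab nxt) 0 "") == "sure")

def process_for_make_verb_adjustment_alt : List String → List String
  | [] => []
  | [cur] => [cur]
  | cur :: nxt :: rest =>
    if pvMergeCond cur nxt then
      pvCombine cur (PySem.List.pyGetD (pvSplitTab nxt) 0 "") :: process_for_make_verb_adjustment_alt rest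
    else
      cur :: process_for_make_verb_adjustment_alt (nxt :: rest)

-- ===== PRECONDITION & SPEC =====
def Spec_process_for_make_verb_adjustment (sentence_input : List String) (out : List String) : Prop := out = process_for_make_verb_adjustment_alt sentence_input
instance (sentence_input : List String) (out : List String) : Decidable (Spec_process_for_make_verb_adjustment sentence_input out) := by unfold Spec_process_for_make_verb_adjustment; infer_instance

-- ===== CLAIM (what is proved, stated in full; the proofs are below) =====
def Claim_equal_process_for_make_verb_adjustment : Prop := ∀ (sentence_input : List String), Dom_process_for_make_verb_adjustment sentence_input → Spec_process_for_make_verb_adjustment sentence_input (process_for_make_verb_adjustment sentence_input)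

-- ===== LEMMAS AND PROOFS =====

theorem pvSplitGo_ne_nil (sep : List Char) : ∀ (fuel : Nat) (l cur : List Char) (acc : List (List Char)),
    PySem.Chars.splitOn.go sep fuel l cur acc ≠ [] := by
  intro fuel
  induction fuel with
  | zero => intro l cur acc; cases l <;> simp [PySem.Chars.splitOn.go]
  | succ n ih =>
    intro l cur acc
    cases l with
    | nil => simp [PySem.Chars.splitOn.go]
    | cons c rest =>
      rw [PySem.Chars.splitOn.go]
      split
      · exact ih _ _ _
      · exact ih _ _ _

theorem pvSplitTab_ne_nil (s : String) : pvSplitTab s ≠ [] := by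
  simp only [pvSplitTab, PySem.Str.split?, PySem.Chars.split?]
  have h : ("\t" : String).toList = ['\t'] := rfl
  rw [h]
  simp [PySem.Chars.splitOn, pvSplitGo_ne_nil]

theorem pvGetD0_pad (w0 : List String) (h : w0 ≠ []) (k : Nat) :
    PySem.List.pyGetD (w0 ++ List.replicate k "") 0 "" = PySem.List.pyGetD w0 0 "" := by
  cases w0 with
  | nil => exact absurd rfl h
  | cons a t => simp [PySem.List.pyGetD_ofNat']

theorem pvMakeA_eq (s : String) :
    pvMakeA s = (PySem.Str.lower (PySem.List.pyGetD (pvSplitTab s) 0 "") == "make"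
      && decide (1 < (pvSplitTab s).length) && (PySem.List.pyGetD (pvSplitTab s) 1 "" == "VV")) := by
  have h := pvSplitTab_ne_nil s
  cases hf : pvSplitTab s with
  | nil => exact absurd hf h
  | cons a t =>
    cases t with
    | nil => simp [pvMakeA, hf, PySem.List.pyGetD_ofNat', List.getD]
    | cons b t' =>
      simp [pvMakeA, hf, PySem.List.pyGetD_ofNat', List.getD]

theorem pvSureA_eq (s : String) :
    pvSureA s = (PySem.Str.lower (PySem.List.pyGetD (pvSplitTab s) 0 "") == "sure") := by
  cases hf : pvSplitTab s with
  | nil => exact absurd hf (pvSplitTab_ne_nil s)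
  | cons a t => simp [pvSureA, hf, PySem.List.pyGetD_ofNat', List.getD]

theorem pvMergeCond_eq (cur nxt : String) :
    pvMergeCond cur nxt = (pvMakeA cur && pvSureA nxt) := by
  rw [pvMakeA_eq, pvSureA_eq]
  unfold pvMergeCond
  rfl

theorem pvMakeA_not_sureA (s : String) (h : pvMakeA s = true) : pvSureA s = false := by
  rw [pvMakeA_eq] at h
  rw [pvSureA_eq]
  simp only [Bool.and_eq_true, beq_iff_eq] at h
  simp [h.1.1]

theorem pvSureA_not_makeA (s : String) (h : pvSureA s = true) : pvMakeA s = false := by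
  rw [pvSureA_eq] at h
  rw [pvMakeA_eq]
  simp only [beq_iff_eq] at h
  simp [h]

theorem pvAlt_cons_of_not_make (cur : String) (xs : List String) (h : pvMakeA cur = false) :
    process_for_make_verb_adjustment_alt (cur :: xs) = cur :: process_for_make_verb_adjustment_alt xs := by
  cases xs with
  | nil => rfl
  | cons nxt rest =>
    rw [process_for_make_verb_adjustment_alt, if_neg]
    rw [pvMergeCond_eq, h]
    simp

theorem pvAlt_cons_cons (c n : String) (r : List String) :
    process_for_make_verb_adjustment_alt (c :: n :: r)
      = if pvMergeCond c n then
          pvCombine c (PySem.List.pyGetD (pvSplitTab n) 0 "") :: process_for_make_verb_adjustment_alt r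
        else c :: process_for_make_verb_adjustment_alt (n :: r) := rfl

-- the main invariant: from a "no pending adjacent make" state (the flag, if set, is stale)
-- A's fold appends alt l to the output built so far; from a "make just emitted" state it
-- appends alt (m :: l) with the make token m sitting as the output's last element.
theorem pvMain (l : List String) :
    (∀ (out : List String) (lmp : Int) (ind : Bool),
       (ind = true → lmp + 1 < (out.length : Int)) →
       (List.foldl pvAStep (out, ((out.length : Int), (lmp, ind))) l).1
         = out ++ process_for_make_verb_adjustment_alt l)
    ∧ (∀ (out : List String) (m : String), pvMakeA m = true →
       (List.foldl pvAStep (out ++ [m], ((out.length : Int) + 1, ((out.length : Int), true))) l).1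
         = out ++ process_for_make_verb_adjustment_alt (m :: l)) := by
  induction l with
  | nil =>
    constructor
    · intro out lmp ind _; simp [process_for_make_verb_adjustment_alt]
    · intro out m _; simp [process_for_make_verb_adjustment_alt]
  | cons x xs ih =>
    constructor
    · intro out lmp ind hstale
      rw [List.foldl_cons]
      by_cases hmk : pvMakeA x = true
      · have hstep : pvAStep (out, ((out.length : Int), (lmp, ind))) x
            = (out ++ [x], (((out.length : Int)) + 1, ((out.length : Int), true))) := by
          simp [pvAStep, hmk]
        rw [hstep]
        have := ih.2 out x hmk
        rw [this]
      · by_cases hsr : (ind && pvSureA x) = true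
        · have hind : ind = true := by
            revert hsr
            cases ind <;> simp
          have hlt := hstale hind
          have hne : (((out.length : Int)) == lmp + 1) = false := by
            simp only [beq_eq_false_iff_ne, ne_eq]
            omega
          have hstep : pvAStep (out, ((out.length : Int), (lmp, ind))) x
              = (out ++ [x], (((out.length : Int)) + 1, (lmp, false))) := by
            simp [pvAStep, hmk, hsr, hne]
          rw [hstep]
          have h1 := ih.1 (out ++ [x]) lmp false (by simp)
          simp only [List.length_append, List.length_cons, List.length_nil, Nat.cast_add,
            Nat.cast_one, zero_add] at h1 ⊢
          rw [h1, pvAlt_cons_of_not_make x xs (by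
            cases hh : pvMakeA x
            · rfl
            · exact absurd hh hmk)]
          simp
        · have hstep : pvAStep (out, ((out.length : Int), (lmp, ind))) x
              = (out ++ [x], (((out.length : Int)) + 1, (lmp, ind))) := by
            simp [pvAStep, hmk, hsr]
          rw [hstep]
          have h1 := ih.1 (out ++ [x]) lmp ind (by
            intro hi
            have := hstale hi
            simp only [List.length_append, List.length_cons, List.length_nil, Nat.cast_add,
              Nat.cast_one, zero_add]
            omega)
          simp only [List.length_append, List.length_cons, List.length_nil, Nat.cast_add,
            Nat.cast_one, zero_add] at h1 ⊢
          rw [h1, pvAlt_cons_of_not_make x xs (by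
            cases hh : pvMakeA x
            · rfl
            · exact absurd hh hmk)]
          simp
    · intro out m hm
      rw [List.foldl_cons]
      by_cases hmk : pvMakeA x = true
      · have hstep : pvAStep (out ++ [m], ((out.length : Int) + 1, ((out.length : Int), true))) x
            = ((out ++ [m]) ++ [x], (((out.length : Int) + 1) + 1, ((out.length : Int) + 1, true))) := by
          simp [pvAStep, hmk]
        rw [hstep]
        have h2 := ih.2 (out ++ [m]) x hmk
        simp only [List.length_append, List.length_cons, List.length_nil, Nat.cast_add,
          Nat.cast_one, zero_add] at h2
        rw [h2]
        have hcond : pvMergeCond m x = false := by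
          rw [pvMergeCond_eq, pvMakeA_not_sureA x hmk]
          simp
        rw [pvAlt_cons_cons, if_neg (by simp [hcond])]
        simp
      · by_cases hsr : pvSureA x = true
        · -- adjacent 'sure': the merge fires
          have hget : PySem.List.pyGetD (out ++ [m]) ((out.length : Int)) "" = m := by
            rw [PySem.List.pyGetD_natCast]
            simp
          have hset : (out ++ [m]).set ((out.length : Int)).toNat
                (pvCombine m (PySem.List.pyGetD (pvSplitTab x) 0 "")) =
              out ++ [pvCombine m (PySem.List.pyGetD (pvSplitTab x) 0 "")] := by
            simp
          have hw0 : PySem.List.pyGetD (pvSplitTab x ++ List.replicate (3 - (pvSplitTab x).length) "") 0 ""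
              = PySem.List.pyGetD (pvSplitTab x) 0 "" := pvGetD0_pad _ (pvSplitTab_ne_nil x) _
          have hstep : pvAStep (out ++ [m], ((out.length : Int) + 1, ((out.length : Int), true))) x
              = (out ++ [pvCombine m (PySem.List.pyGetD (pvSplitTab x) 0 "")],
                 ((out.length : Int) + 1, ((out.length : Int), false))) := by
            simp only [pvAStep, pvSureA_not_makeA x hsr, Bool.false_eq_true, if_false, hsr,
              Bool.and_self, if_true, beq_self_eq_true, hw0, hget, hset]
            simp
          rw [hstep]
          have h1 := ih.1 (out ++ [pvCombine m (PySem.List.pyGetD (pvSplitTab x) 0 "")])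
            ((out.length : Int)) false (by simp)
          simp only [List.length_append, List.length_cons, List.length_nil, Nat.cast_add,
            Nat.cast_one, zero_add] at h1
          rw [h1]
          have hcond : pvMergeCond m x = true := by
            rw [pvMergeCond_eq, hm, hsr]; rfl
          rw [pvAlt_cons_cons, if_pos (by simp [hcond])]
          simp
        · -- flag goes stale
          have hmk' : pvMakeA x = false := by
            cases hh : pvMakeA x
            · rfl
            · exact absurd hh hmk
          have hsr' : pvSureA x = false := by
            cases hh : pvSureA x
            · rfl
            · exact absurd hh hsr
          have hstep : pvAStep (out ++ [m], ((out.length : Int) + 1, ((out.length : Int), true))) x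
              = ((out ++ [m]) ++ [x], (((out.length : Int) + 1) + 1, ((out.length : Int), true))) := by
            simp [pvAStep, hmk', hsr]
          rw [hstep]
          have h1 := ih.1 ((out ++ [m]) ++ [x]) ((out.length : Int)) true (by
            simp only [List.length_append, List.length_cons, List.length_nil, Nat.cast_add,
              Nat.cast_one, zero_add]
            omega)
          simp only [List.length_append, List.length_cons, List.length_nil, Nat.cast_add,
            Nat.cast_one, zero_add] at h1 ⊢
          rw [h1]
          have hcond : pvMergeCond m x = false := by
            rw [pvMergeCond_eq, hsr']
            simp
          rw [pvAlt_cons_cons, if_neg (by simp [hcond]), pvAlt_cons_of_not_make x xs hmk']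
          simp

-- ===== VERDICT (by name: the statement is the Claim_ definition above) =====
theorem process_for_make_verb_adjustment_spec : Claim_equal_process_for_make_verb_adjustment := by
  intro l _
  unfold Spec_process_for_make_verb_adjustment process_for_make_verb_adjustment
  have h := (pvMain l).1 [] 0 false (by simp)
  simpa using h
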